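-- pv_equiv track=rewrite | github.com/sudosf/Competetive-Programming-2022 | Practice-Solutions/ISBN.py | validateISBN
-- ===== SOURCE A (Python) =====
-- def isValidISBN_10(num):
--     size = len(num)
--
--     start = 1
--     if (num[9] == 'X'):
--         sum = 10
--         start += 1
--     else: sum = 0
--
--     j = 0
--     for i in reversed(range(start, size + 1)):
--         sum += int(num[j]) * i
--         j += 1
--
--     return (sum % 11 == 0)
--
-- def isValidISBN_13(num):
--     size = len(num)
--
--     sum = 0
--     j = 0
--     for i in range(1, size + 1):
--         if (i % 2 == 0): sum += int(num[j]) * 3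
--         else: sum += int(num[j])
--         j += 1
--
--     return (sum % 10 == 0)
--
-- def validateISBN(num):
--     result = "Invalid"
--
--     if (len(num) == 10):
--         if (isValidISBN_10(num)):
--             # convert to ISBN 13
--             converted = "978" + num;
--
--             if (converted[12] == "X"):
--                 converted = converted[0:12] + "0"
--
--             i = int(converted[12]) + 1
--
--             while not (isValidISBN_13(converted)):
--                 converted = converted[0:12] + str(i)
--                 i += 1
--                 if (i > 9): i = 0
--
--             result = converted
--
--     elif (len(num) == 13):
--         if (isValidISBN_13(num)): result = "Valid"
--
--     return result
-- ===== SOURCE B (Python) =====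
-- def validateISBN(num):
--     if len(num) == 10:
--         digits = [10 if (i == 9 and c == 'X') else int(c) for i, c in enumerate(num)]
--         if sum((10 - i) * d for i, d in enumerate(digits)) % 11 == 0:
--             prefix = "978" + num[:9]
--             s = sum(int(c) * (3 if i % 2 else 1) for i, c in enumerate(prefix))
--             return prefix + str((10 - s % 10) % 10)
--         return "Invalid"
--     if len(num) == 13:
--         s = sum(int(c) * (3 if i % 2 else 1) for i, c in enumerate(num))
--         return "Valid" if s % 10 == 0 else "Invalid"
--     return "Invalid"
-- ===== Notes on version B (the rewrite author's own statement) =====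
-- stated objective: simpler
-- what changed: B replaces A's helper loops with manual j-counters by enumerate-based weighted sums and, in the ISBN-10 to ISBN-13 conversion, drops A's incremental while-search for the check digit in favour of the closed form (10 - s%10) % 10.
-- intended difference: On valid length-10 ISBNs whose last character is the digit nine and whose ISBN-13 check digit is one, A's search loop writes str(10) into the check position and returns a 14-character string (e.g. A('0000000949') == '97800000009410'), while B returns the correct 13-digit ISBN ('9780000000941'); B's value is the intended conversion. — e.g. on validateISBN("0000000949"): A returns "97800000009410", B returns "9780000000941"
import Mathlib
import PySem

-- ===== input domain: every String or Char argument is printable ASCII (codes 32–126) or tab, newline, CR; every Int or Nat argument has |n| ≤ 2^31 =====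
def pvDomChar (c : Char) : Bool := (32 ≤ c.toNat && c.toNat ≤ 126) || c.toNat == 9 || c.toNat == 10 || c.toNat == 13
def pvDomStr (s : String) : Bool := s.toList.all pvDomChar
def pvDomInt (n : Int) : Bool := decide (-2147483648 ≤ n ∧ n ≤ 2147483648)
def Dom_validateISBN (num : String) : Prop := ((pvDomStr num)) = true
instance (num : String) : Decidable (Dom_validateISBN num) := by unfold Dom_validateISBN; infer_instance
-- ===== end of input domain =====

-- B replaces A's index-counter validation loops by enumerate-style weighted sums and replaces
-- A's incremental while-search for the ISBN-13 check digit by the closed form (10 - s%10) % 10;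
-- objective: simpler. On valid ISBN-10s ending in '9' whose ISBN-13 check digit is 1, A returns a
-- 14-character string ending "10" (see D_ below); B returns the intended 13-digit ISBN.


-- ===== PORT A =====
-- int(c) for a one-character string; none (ValueError on a non-digit) is excluded by Pre_
def pvCharInt (c : Char) : Int := (PySem.Int.ofChars? [c]).getD 0

def isValidISBN_10 (num : String) : Bool :=
  let cs := num.toList
  let size : Int := PySem.Str.len num
  let startSum : Int × Int := if PySem.List.pyGetD cs 9 ' ' = 'X' then (2, 10) else (1, 0)
  let r := ((PySem.List.pyRange startSum.1 (size + 1) 1).reverse).foldl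
      (fun (st : Int × Int) i => (st.1 + pvCharInt (PySem.List.pyGetD cs st.2 ' ') * i, st.2 + 1))
      (startSum.2, 0)
  PySem.Int.mod r.1 11 == 0

def isValidISBN_13 (num : String) : Bool :=
  let cs := num.toList
  let size : Int := PySem.Str.len num
  let r := (PySem.List.pyRange 1 (size + 1) 1).foldl
      (fun (st : Int × Int) i =>
        (st.1 + (if PySem.Int.mod i 2 = 0 then pvCharInt (PySem.List.pyGetD cs st.2 ' ') * 3
                 else pvCharInt (PySem.List.pyGetD cs st.2 ' ')), st.2 + 1))
      (0, 0)
  PySem.Int.mod r.1 10 == 0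

-- A's while-search; the fuel 13 only makes the recursion structural: on every input A
-- reaches, the search returns within at most 11 iterations (proved via loop_digit below)
def pvSearchLoop : Nat → String → Int → String
  | 0, conv, _ => conv
  | fuel + 1, conv, i =>
    if isValidISBN_13 conv then conv
    else
      pvSearchLoop fuel
        (String.ofList (PySem.List.slice conv.toList (some 0) (some 12) ++ PySem.Int.toChars i))
        (if i + 1 > 9 then 0 else i + 1)

-- converted = ...; i = int(converted[12]) + 1; while-loop — the tail of A's ISBN-10 branch
def pvConvert (converted : String) : String :=
  pvSearchLoop 13 converted (pvCharInt (PySem.List.pyGetD converted.toList 12 ' ') + 1)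

def validateISBN (num : String) : String :=
  if PySem.Str.len num = 10 then
    if isValidISBN_10 num then
      pvConvert
        (if PySem.List.pyGetD (String.ofList (['9','7','8'] ++ num.toList)).toList 12 ' ' = 'X' then
          String.ofList
            (PySem.List.slice (String.ofList (['9','7','8'] ++ num.toList)).toList (some 0) (some 12)
              ++ ['0'])
        else String.ofList (['9','7','8'] ++ num.toList))
    else "Invalid"
  else if PySem.Str.len num = 13 then
    if isValidISBN_13 num then "Valid" else "Invalid"
  else "Invalid"

-- ===== PORT B =====
def validateISBN_alt (num : String) : String :=
  let cs := num.toList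
  if PySem.Str.len num = 10 then
    let digits := (PySem.List.enumerate cs 0).map
      (fun p => if p.1 = 9 ∧ p.2 = 'X' then 10 else pvCharInt p.2)
    if PySem.Int.mod (((PySem.List.enumerate digits 0).map (fun p => (10 - p.1) * p.2)).sum) 11 = 0 then
      let pref := ['9', '7', '8'] ++ PySem.List.slice cs none (some 9)
      let s := ((PySem.List.enumerate pref 0).map
        (fun p => pvCharInt p.2 * (if PySem.Int.mod p.1 2 ≠ 0 then 3 else 1))).sum
      String.ofList (pref ++ PySem.Int.toChars (PySem.Int.mod (10 - PySem.Int.mod s 10) 10))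
    else "Invalid"
  else if PySem.Str.len num = 13 then
    let s := ((PySem.List.enumerate cs 0).map
      (fun p => pvCharInt p.2 * (if PySem.Int.mod p.1 2 ≠ 0 then 3 else 1))).sum
    if PySem.Int.mod s 10 = 0 then "Valid" else "Invalid"
  else "Invalid"


-- ---- proof-side helpers ----

-- ===== PRECONDITION & SPEC =====
def pvDigit (c : Char) : Bool := ['0','1','2','3','4','5','6','7','8','9'].contains c

-- Pre_ excludes exactly the inputs where int() raises ValueError in Python A: a length-10 string
-- whose first 9 characters are not all digits or whose last is neither a digit nor 'X', and a
-- length-13 string that is not all digits. All other strings are admitted.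
def Pre_validateISBN (num : String) : Prop :=
  (num.toList.length = 10 →
    (num.toList.take 9).all pvDigit = true ∧
      (pvDigit (num.toList.getD 9 ' ') = true ∨ num.toList.getD 9 ' ' = 'X')) ∧
  (num.toList.length = 13 → num.toList.all pvDigit = true)

instance (num : String) : Decidable (Pre_validateISBN num) := by
  unfold Pre_validateISBN; infer_instance

def pvWitness_validateISBN : String := "0123456789"

-- On valid ISBN-10 inputs whose last character is '9' and whose ISBN-13 check digit is 1, A's
-- search loop writes str(10) into the check position and returns a 14-character string ending in
-- "10"; B returns the correct 13-digit ISBN ending in '1', which is the intended conversion.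
-- D_ solely for experimentation here (final file places it before the claim block)

-- weighted checksum of the character values, the defining ISBN property (zip with a weight list)
def pvW (l : List Char) (w : List Int) : Int :=
  (List.zip l w).foldr (fun p t => ((p.1.toNat : Int) - 48) * p.2 + t) 0

def D_validateISBN (num : String) : Prop :=
  num.toList.length = 10 ∧ num.toList.getD 9 ' ' = '9' ∧
    pvW num.toList [10,9,8,7,6,5,4,3,2,1] % 11 = 0 ∧
    (38 + pvW num.toList [3,1,3,1,3,1,3,1,3]) % 10 = 9

instance (num : String) : Decidable (D_validateISBN num) := by
  unfold D_validateISBN; infer_instance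

def Spec_validateISBN (num : String) (out : String) : Prop :=
  ¬ D_validateISBN num → out = validateISBN_alt num

instance (num : String) (out : String) : Decidable (Spec_validateISBN num out) := by
  unfold Spec_validateISBN; infer_instance

def pvDiffWitness_validateISBN : String := "0000000949"

def pvDiffWitnessOut_validateISBN : String × String := ("97800000009410", "9780000000941")

-- ===== CLAIM (what is proved, stated in full; the proofs are below) =====
def Claim_unchanged_validateISBN : Prop :=
  ∀ (num : String), Dom_validateISBN num → Pre_validateISBN num →
    Spec_validateISBN num (validateISBN num)

def Claim_changed_validateISBN : Prop :=
  Dom_validateISBN (pvDiffWitness_validateISBN) ∧ Pre_validateISBN (pvDiffWitness_validateISBN) ∧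
    D_validateISBN (pvDiffWitness_validateISBN) ∧
    validateISBN (pvDiffWitness_validateISBN) = pvDiffWitnessOut_validateISBN.1 ∧
    validateISBN_alt (pvDiffWitness_validateISBN) = pvDiffWitnessOut_validateISBN.2 ∧
    pvDiffWitnessOut_validateISBN.1 ≠ pvDiffWitnessOut_validateISBN.2

def Claim_exact_validateISBN : Prop :=
  ∀ (num : String), Dom_validateISBN num → Pre_validateISBN num → D_validateISBN num →
    validateISBN num ≠ validateISBN_alt num

-- ===== LEMMAS AND PROOFS =====
def pvPref (a0 a1 a2 a3 a4 a5 a6 a7 a8 : Char) : List Char :=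
  ['9','7','8',a0,a1,a2,a3,a4,a5,a6,a7,a8]

def pvS (a0 a1 a2 a3 a4 a5 a6 a7 a8 : Char) : Int :=
  38 + 3*pvCharInt a0 + pvCharInt a1 + 3*pvCharInt a2 + pvCharInt a3 + 3*pvCharInt a4
    + pvCharInt a5 + 3*pvCharInt a6 + pvCharInt a7 + 3*pvCharInt a8

lemma valid13_eval (s : String) (c0 c1 c2 c3 c4 c5 c6 c7 c8 c9 c10 c11 c12 : Char)
    (h : s.toList = [c0,c1,c2,c3,c4,c5,c6,c7,c8,c9,c10,c11,c12]) :
    isValidISBN_13 s = (PySem.Int.mod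
      (pvCharInt c0 + 3*pvCharInt c1 + pvCharInt c2 + 3*pvCharInt c3 + pvCharInt c4 + 3*pvCharInt c5
        + pvCharInt c6 + 3*pvCharInt c7 + pvCharInt c8 + 3*pvCharInt c9 + pvCharInt c10 + 3*pvCharInt c11
        + pvCharInt c12) 10 == 0) := by
  have hlen : PySem.Str.len s = 13 := by simp [PySem.Str.len_eq, h]
  rw [isValidISBN_13]
  simp only [hlen, h]
  have h2 : PySem.List.pyRange 1 ((13:Int) + 1) 1 = [1,2,3,4,5,6,7,8,9,10,11,12,13] := by decide
  rw [h2]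
  simp only [List.foldl]
  norm_num [PySem.List.pyGetD_ofNat', PySem.Int.mod,
    show Int.fmod (1:Int) 2 = 1 from by decide, show Int.fmod (3:Int) 2 = 1 from by decide,
    show Int.fmod (5:Int) 2 = 1 from by decide, show Int.fmod (7:Int) 2 = 1 from by decide,
    show Int.fmod (9:Int) 2 = 1 from by decide, show Int.fmod (11:Int) 2 = 1 from by decide,
    show Int.fmod (13:Int) 2 = 1 from by decide, show Int.fmod (4:Int) 2 = 0 from by decide,
    show Int.fmod (6:Int) 2 = 0 from by decide, show Int.fmod (8:Int) 2 = 0 from by decide,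
    show Int.fmod (10:Int) 2 = 0 from by decide, show Int.fmod (12:Int) 2 = 0 from by decide]
  ring_nf

lemma valid13_eval14 (s : String) (c0 c1 c2 c3 c4 c5 c6 c7 c8 c9 c10 c11 c12 c13 : Char)
    (h : s.toList = [c0,c1,c2,c3,c4,c5,c6,c7,c8,c9,c10,c11,c12,c13]) :
    isValidISBN_13 s = (PySem.Int.mod
      (pvCharInt c0 + 3*pvCharInt c1 + pvCharInt c2 + 3*pvCharInt c3 + pvCharInt c4 + 3*pvCharInt c5
        + pvCharInt c6 + 3*pvCharInt c7 + pvCharInt c8 + 3*pvCharInt c9 + pvCharInt c10 + 3*pvCharInt c11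
        + pvCharInt c12 + 3*pvCharInt c13) 10 == 0) := by
  have hlen : PySem.Str.len s = 14 := by simp [PySem.Str.len_eq, h]
  rw [isValidISBN_13]
  simp only [hlen, h]
  have h2 : PySem.List.pyRange 1 ((14:Int) + 1) 1 = [1,2,3,4,5,6,7,8,9,10,11,12,13,14] := by decide
  rw [h2]
  simp only [List.foldl]
  norm_num [PySem.List.pyGetD_ofNat', PySem.Int.mod,
    show Int.fmod (1:Int) 2 = 1 from by decide, show Int.fmod (3:Int) 2 = 1 from by decide,
    show Int.fmod (5:Int) 2 = 1 from by decide, show Int.fmod (7:Int) 2 = 1 from by decide,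
    show Int.fmod (9:Int) 2 = 1 from by decide, show Int.fmod (11:Int) 2 = 1 from by decide,
    show Int.fmod (13:Int) 2 = 1 from by decide, show Int.fmod (4:Int) 2 = 0 from by decide,
    show Int.fmod (6:Int) 2 = 0 from by decide, show Int.fmod (8:Int) 2 = 0 from by decide,
    show Int.fmod (10:Int) 2 = 0 from by decide, show Int.fmod (12:Int) 2 = 0 from by decide,
    show Int.fmod (14:Int) 2 = 0 from by decide]
  ring_nf

lemma valid13_pref (s : String) (a0 a1 a2 a3 a4 a5 a6 a7 a8 x : Char)
    (h : s.toList = pvPref a0 a1 a2 a3 a4 a5 a6 a7 a8 ++ [x]) :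
    isValidISBN_13 s = (PySem.Int.mod (pvS a0 a1 a2 a3 a4 a5 a6 a7 a8 + pvCharInt x) 10 == 0) := by
  rw [valid13_eval s '9' '7' '8' a0 a1 a2 a3 a4 a5 a6 a7 a8 x (by simpa [pvPref] using h)]
  have : pvCharInt '9' + 3*pvCharInt '7' + pvCharInt '8' + 3*pvCharInt a0 + pvCharInt a1 + 3*pvCharInt a2
        + pvCharInt a3 + 3*pvCharInt a4 + pvCharInt a5 + 3*pvCharInt a6 + pvCharInt a7 + 3*pvCharInt a8
        + pvCharInt x = pvS a0 a1 a2 a3 a4 a5 a6 a7 a8 + pvCharInt x := by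
    simp [pvS, show pvCharInt '9' = 9 from by decide, show pvCharInt '7' = 7 from by decide,
      show pvCharInt '8' = 8 from by decide]
  rw [this]

lemma valid13_pref10 (s : String) (a0 a1 a2 a3 a4 a5 a6 a7 a8 : Char)
    (h : s.toList = pvPref a0 a1 a2 a3 a4 a5 a6 a7 a8 ++ ['1','0']) :
    isValidISBN_13 s = (PySem.Int.mod (pvS a0 a1 a2 a3 a4 a5 a6 a7 a8 + 1) 10 == 0) := by
  rw [valid13_eval14 s '9' '7' '8' a0 a1 a2 a3 a4 a5 a6 a7 a8 '1' '0' (by simpa [pvPref] using h)]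
  have : pvCharInt '9' + 3*pvCharInt '7' + pvCharInt '8' + 3*pvCharInt a0 + pvCharInt a1 + 3*pvCharInt a2
        + pvCharInt a3 + 3*pvCharInt a4 + pvCharInt a5 + 3*pvCharInt a6 + pvCharInt a7 + 3*pvCharInt a8
        + pvCharInt '1' + 3*pvCharInt '0' = pvS a0 a1 a2 a3 a4 a5 a6 a7 a8 + 1 := by
    simp [pvS, show pvCharInt '9' = 9 from by decide, show pvCharInt '7' = 7 from by decide,
      show pvCharInt '8' = 8 from by decide, show pvCharInt '1' = 1 from by decide,
      show pvCharInt '0' = 0 from by decide]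
  rw [this]

lemma slice12_pref (a0 a1 a2 a3 a4 a5 a6 a7 a8 : Char) (t : List Char) :
    PySem.List.slice (pvPref a0 a1 a2 a3 a4 a5 a6 a7 a8 ++ t) (some 0) (some 12) =
      pvPref a0 a1 a2 a3 a4 a5 a6 a7 a8 := by
  rw [show ((12:Int)) = ((12:Nat):Int) from by norm_num, PySem.List.slice_zero_start,
    PySem.List.slice_to_natCast]
  simp [pvPref]

lemma valid10_eval (s : String) (c0 c1 c2 c3 c4 c5 c6 c7 c8 c9 : Char)
    (h : s.toList = [c0,c1,c2,c3,c4,c5,c6,c7,c8,c9]) (hnX : c9 ≠ 'X') :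
    isValidISBN_10 s = (PySem.Int.mod
      (10*pvCharInt c0 + 9*pvCharInt c1 + 8*pvCharInt c2 + 7*pvCharInt c3 + 6*pvCharInt c4
        + 5*pvCharInt c5 + 4*pvCharInt c6 + 3*pvCharInt c7 + 2*pvCharInt c8 + pvCharInt c9) 11 == 0) := by
  have hlen : PySem.Str.len s = 10 := by simp [PySem.Str.len_eq, h]
  rw [isValidISBN_10]
  simp only [hlen, h]
  rw [show PySem.List.pyGetD [c0,c1,c2,c3,c4,c5,c6,c7,c8,c9] (9:Int) ' ' = c9 from by
    norm_num [PySem.List.pyGetD_ofNat']]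
  rw [if_neg hnX]
  have h2 : (PySem.List.pyRange 1 ((10:Int) + 1) 1).reverse = [10,9,8,7,6,5,4,3,2,1] := by decide
  rw [h2]
  simp only [List.foldl]
  norm_num [PySem.List.pyGetD_ofNat']
  ring_nf

lemma valid10_evalX (s : String) (c0 c1 c2 c3 c4 c5 c6 c7 c8 : Char)
    (h : s.toList = [c0,c1,c2,c3,c4,c5,c6,c7,c8,'X']) :
    isValidISBN_10 s = (PySem.Int.mod
      (10 + 10*pvCharInt c0 + 9*pvCharInt c1 + 8*pvCharInt c2 + 7*pvCharInt c3 + 6*pvCharInt c4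
        + 5*pvCharInt c5 + 4*pvCharInt c6 + 3*pvCharInt c7 + 2*pvCharInt c8) 11 == 0) := by
  have hlen : PySem.Str.len s = 10 := by simp [PySem.Str.len_eq, h]
  rw [isValidISBN_10]
  simp only [hlen, h]
  rw [show PySem.List.pyGetD [c0,c1,c2,c3,c4,c5,c6,c7,c8,'X'] (9:Int) ' ' = 'X' from by
    norm_num [PySem.List.pyGetD_ofNat']]
  rw [if_pos rfl]
  have h2 : (PySem.List.pyRange 2 ((10:Int) + 1) 1).reverse = [10,9,8,7,6,5,4,3,2] := by decide
  rw [h2]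
  simp only [List.foldl]
  norm_num [PySem.List.pyGetD_ofNat']
  ring_nf

lemma toChars_digit (j : Int) (h0 : 0 ≤ j) (h9 : j ≤ 9) :
    PySem.Int.toChars j = [Char.ofNat (48 + j.toNat)] := by
  interval_cases j <;> decide

lemma charInt_digitChar (j : Int) (h0 : 0 ≤ j) (h9 : j ≤ 9) :
    pvCharInt (Char.ofNat (48 + j.toNat)) = j := by
  interval_cases j <;> decide

lemma pvMod_emod (a : Int) : PySem.Int.mod a 10 = a % 10 :=
  PySem.Int.mod_eq_emod_of_pos (by norm_num)

lemma loop_digit (a0 a1 a2 a3 a4 a5 a6 a7 a8 : Char) (d : Int)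
    (hd0 : 0 ≤ d) (hd9 : d ≤ 9) (hdm : (pvS a0 a1 a2 a3 a4 a5 a6 a7 a8 + d) % 10 = 0) :
    ∀ (fuel : Nat) (j : Int), 0 ≤ j → j ≤ 9 → ((d - j) % 10).toNat < fuel →
      pvSearchLoop fuel
        (String.ofList (pvPref a0 a1 a2 a3 a4 a5 a6 a7 a8 ++ PySem.Int.toChars j))
        (if j + 1 > 9 then 0 else j + 1)
      = String.ofList (pvPref a0 a1 a2 a3 a4 a5 a6 a7 a8 ++ PySem.Int.toChars d) := by
  intro fuel
  induction fuel with
  | zero => intro j _ _ hf; exact absurd hf (by omega)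
  | succ f ih =>
    intro j hj0 hj9 hf
    rw [toChars_digit j hj0 hj9, pvSearchLoop,
      valid13_pref _ a0 a1 a2 a3 a4 a5 a6 a7 a8 (Char.ofNat (48 + j.toNat)) (by simp),
      charInt_digitChar j hj0 hj9]
    simp only [pvMod_emod]
    by_cases hv : (pvS a0 a1 a2 a3 a4 a5 a6 a7 a8 + j) % 10 = 0
    · have hdj : d = j := by omega
      subst hdj
      simp [hv, toChars_digit d hj0 hj9]
    · rw [if_neg (by simp [hv])]
      simp only [String.toList_ofList]
      rw [slice12_pref]
      by_cases h9 : j + 1 > 9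
      · rw [if_pos h9]
        have hj' : j = 9 := by omega
        exact ih 0 (by norm_num) (by norm_num) (by subst hj'; omega)
      · rw [if_neg h9]
        exact ih (j + 1) (by omega) (by omega) (by omega)

lemma digit_char (c : Char) (h : pvDigit c = true) :
    0 ≤ pvCharInt c ∧ pvCharInt c ≤ 9 ∧ c = Char.ofNat (48 + (pvCharInt c).toNat) := by
  simp [pvDigit, List.contains_eq_mem] at h
  rcases h with rfl|rfl|rfl|rfl|rfl|rfl|rfl|rfl|rfl|rfl <;> refine ⟨by decide, by decide, by decide⟩

lemma searchLoop_main (a0 a1 a2 a3 a4 a5 a6 a7 a8 c : Char) (hc : pvDigit c = true)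
    (d : Int) (hd0 : 0 ≤ d) (hd9 : d ≤ 9)
    (hdm : (pvS a0 a1 a2 a3 a4 a5 a6 a7 a8 + d) % 10 = 0) :
    pvSearchLoop 13 (String.ofList (pvPref a0 a1 a2 a3 a4 a5 a6 a7 a8 ++ [c])) (pvCharInt c + 1)
      = if pvCharInt c = 9 ∧ d = 1
        then String.ofList (pvPref a0 a1 a2 a3 a4 a5 a6 a7 a8 ++ ['1','0'])
        else String.ofList (pvPref a0 a1 a2 a3 a4 a5 a6 a7 a8 ++ PySem.Int.toChars d) := by
  obtain ⟨hv0, hv9, hcd⟩ := digit_char c hc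
  rw [show (13:Nat) = 12 + 1 from rfl, pvSearchLoop,
    valid13_pref _ a0 a1 a2 a3 a4 a5 a6 a7 a8 c (by simp)]
  simp only [pvMod_emod]
  by_cases hv : (pvS a0 a1 a2 a3 a4 a5 a6 a7 a8 + pvCharInt c) % 10 = 0
  · -- current digit already valid: d = pvCharInt c, the loop returns at once
    have hdc : d = pvCharInt c := by omega
    rw [if_pos (show ((pvS a0 a1 a2 a3 a4 a5 a6 a7 a8 + pvCharInt c) % 10 == 0) = true from by
          simp [hv]),
      if_neg (show ¬(pvCharInt c = 9 ∧ d = 1) from by omega),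
      hdc, toChars_digit _ hv0 hv9, ← hcd]
  · rw [if_neg (show ¬((pvS a0 a1 a2 a3 a4 a5 a6 a7 a8 + pvCharInt c) % 10 == 0) = true from by
      simp [hv])]
    simp only [String.toList_ofList]
    rw [slice12_pref]
    have hne : d ≠ pvCharInt c := by omega
    by_cases h9 : pvCharInt c = 9
    · -- start digit '9': the loop first tries str(10), a 14-character string
      rw [show PySem.Int.toChars (pvCharInt c + 1) = ['1','0'] from by rw [h9]; decide,
        show (if pvCharInt c + 1 + 1 > 9 then (0:Int) else pvCharInt c + 1 + 1) = 0 from by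
          rw [h9]; norm_num,
        show (12:Nat) = 11 + 1 from rfl, pvSearchLoop,
        valid13_pref10 _ a0 a1 a2 a3 a4 a5 a6 a7 a8 (by simp)]
      simp only [pvMod_emod]
      by_cases ha : (pvS a0 a1 a2 a3 a4 a5 a6 a7 a8 + 1) % 10 = 0
      · -- the 14-character string is accepted: A returns it (the intended difference)
        have hd1 : d = 1 := by omega
        rw [if_pos (show ((pvS a0 a1 a2 a3 a4 a5 a6 a7 a8 + 1) % 10 == 0) = true from by
            simp [ha]),
          if_pos (show pvCharInt c = 9 ∧ d = 1 from ⟨h9, hd1⟩)]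
      · rw [if_neg (show ¬((pvS a0 a1 a2 a3 a4 a5 a6 a7 a8 + 1) % 10 == 0) = true from by
          simp [ha])]
        simp only [String.toList_ofList]
        rw [slice12_pref, if_neg (show ¬(pvCharInt c = 9 ∧ d = 1) from by
          rintro ⟨-, rfl⟩; exact ha hdm)]
        exact loop_digit a0 a1 a2 a3 a4 a5 a6 a7 a8 d hd0 hd9 hdm 11 0 (by norm_num) (by norm_num)
          (by omega)
    · -- start digit below 9: step to digit c+1 and search onward
      rw [if_neg (show ¬(pvCharInt c = 9 ∧ d = 1) from fun h => h9 h.1)]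
      exact loop_digit a0 a1 a2 a3 a4 a5 a6 a7 a8 d hd0 hd9 hdm 12 (pvCharInt c + 1)
        (by omega) (by omega) (by omega)

lemma pyGetD12 (x : Char) (a0 a1 a2 a3 a4 a5 a6 a7 a8 : Char) :
    PySem.List.pyGetD (pvPref a0 a1 a2 a3 a4 a5 a6 a7 a8 ++ [x]) (12:Int) ' ' = x := by
  norm_num [pvPref, PySem.List.pyGetD_ofNat']

lemma A_len10 (num : String) (a0 a1 a2 a3 a4 a5 a6 a7 a8 a9 : Char)
    (hl : num.toList = [a0,a1,a2,a3,a4,a5,a6,a7,a8,a9]) (hX : a9 ≠ 'X') :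
    validateISBN num =
      if PySem.Int.mod (10*pvCharInt a0 + 9*pvCharInt a1 + 8*pvCharInt a2 + 7*pvCharInt a3
          + 6*pvCharInt a4 + 5*pvCharInt a5 + 4*pvCharInt a6 + 3*pvCharInt a7 + 2*pvCharInt a8
          + pvCharInt a9) 11 == 0 then
        pvSearchLoop 13 (String.ofList (pvPref a0 a1 a2 a3 a4 a5 a6 a7 a8 ++ [a9]))
          (pvCharInt a9 + 1)
      else "Invalid" := by
  have hlen : PySem.Str.len num = 10 := by simp [PySem.Str.len_eq, hl]
  rw [validateISBN]
  rw [if_pos (show PySem.Str.len num = 10 from hlen),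
    valid10_eval num a0 a1 a2 a3 a4 a5 a6 a7 a8 a9 hl hX]
  have happ : ['9','7','8'] ++ num.toList = pvPref a0 a1 a2 a3 a4 a5 a6 a7 a8 ++ [a9] := by
    simp [hl, pvPref]
  rw [happ, String.toList_ofList, pyGetD12, if_neg hX, pvConvert, String.toList_ofList, pyGetD12]

lemma A_len10X (num : String) (a0 a1 a2 a3 a4 a5 a6 a7 a8 : Char)
    (hl : num.toList = [a0,a1,a2,a3,a4,a5,a6,a7,a8,'X']) :
    validateISBN num =
      if PySem.Int.mod (10 + 10*pvCharInt a0 + 9*pvCharInt a1 + 8*pvCharInt a2 + 7*pvCharInt a3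
          + 6*pvCharInt a4 + 5*pvCharInt a5 + 4*pvCharInt a6 + 3*pvCharInt a7 + 2*pvCharInt a8) 11
          == 0 then
        pvSearchLoop 13 (String.ofList (pvPref a0 a1 a2 a3 a4 a5 a6 a7 a8 ++ ['0']))
          (pvCharInt '0' + 1)
      else "Invalid" := by
  have hlen : PySem.Str.len num = 10 := by simp [PySem.Str.len_eq, hl]
  rw [validateISBN]
  rw [if_pos (show PySem.Str.len num = 10 from hlen),
    valid10_evalX num a0 a1 a2 a3 a4 a5 a6 a7 a8 hl]
  have happ : ['9','7','8'] ++ num.toList = pvPref a0 a1 a2 a3 a4 a5 a6 a7 a8 ++ ['X'] := by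
    simp [hl, pvPref]
  rw [happ, String.toList_ofList, pyGetD12, if_pos rfl, slice12_pref, pvConvert,
    String.toList_ofList, pyGetD12]

lemma B_len10 (num : String) (a0 a1 a2 a3 a4 a5 a6 a7 a8 a9 : Char)
    (hl : num.toList = [a0,a1,a2,a3,a4,a5,a6,a7,a8,a9]) (hX : a9 ≠ 'X') :
    validateISBN_alt num =
      if PySem.Int.mod (10*pvCharInt a0 + 9*pvCharInt a1 + 8*pvCharInt a2 + 7*pvCharInt a3
          + 6*pvCharInt a4 + 5*pvCharInt a5 + 4*pvCharInt a6 + 3*pvCharInt a7 + 2*pvCharInt a8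
          + pvCharInt a9) 11 = 0 then
        String.ofList (pvPref a0 a1 a2 a3 a4 a5 a6 a7 a8
          ++ PySem.Int.toChars (PySem.Int.mod (10 - PySem.Int.mod (pvS a0 a1 a2 a3 a4 a5 a6 a7 a8) 10) 10))
      else "Invalid" := by
  have hlen : PySem.Str.len num = 10 := by simp [PySem.Str.len_eq, hl]
  rw [validateISBN_alt]
  simp only [hl, hlen, PySem.List.enumerate_cons, PySem.List.enumerate_nil]
  norm_num [PySem.List.slice_to, pvPref, pvS, hX, PySem.List.enumerate_cons,
    PySem.List.enumerate_nil, show Int.toNat 9 = 9 from rfl, List.take_succ_cons, List.take_zero,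
    show pvCharInt '9' = 9 from by decide, show pvCharInt '7' = 7 from by decide,
    show pvCharInt '8' = 8 from by decide]
  ring_nf

lemma B_len10X (num : String) (a0 a1 a2 a3 a4 a5 a6 a7 a8 : Char)
    (hl : num.toList = [a0,a1,a2,a3,a4,a5,a6,a7,a8,'X']) :
    validateISBN_alt num =
      if PySem.Int.mod (10 + 10*pvCharInt a0 + 9*pvCharInt a1 + 8*pvCharInt a2 + 7*pvCharInt a3
          + 6*pvCharInt a4 + 5*pvCharInt a5 + 4*pvCharInt a6 + 3*pvCharInt a7 + 2*pvCharInt a8) 11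
          = 0 then
        String.ofList (pvPref a0 a1 a2 a3 a4 a5 a6 a7 a8
          ++ PySem.Int.toChars (PySem.Int.mod (10 - PySem.Int.mod (pvS a0 a1 a2 a3 a4 a5 a6 a7 a8) 10) 10))
      else "Invalid" := by
  have hlen : PySem.Str.len num = 10 := by simp [PySem.Str.len_eq, hl]
  rw [validateISBN_alt]
  simp only [hl, hlen, PySem.List.enumerate_cons, PySem.List.enumerate_nil]
  norm_num [PySem.List.slice_to, pvPref, pvS, PySem.List.enumerate_cons,
    PySem.List.enumerate_nil, show Int.toNat 9 = 9 from rfl, List.take_succ_cons, List.take_zero,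
    show pvCharInt '9' = 9 from by decide, show pvCharInt '7' = 7 from by decide,
    show pvCharInt '8' = 8 from by decide]
  ring_nf

lemma B_len13 (num : String) (c0 c1 c2 c3 c4 c5 c6 c7 c8 c9 c10 c11 c12 : Char)
    (hl : num.toList = [c0,c1,c2,c3,c4,c5,c6,c7,c8,c9,c10,c11,c12]) :
    validateISBN_alt num =
      if PySem.Int.mod
          (pvCharInt c0 + 3*pvCharInt c1 + pvCharInt c2 + 3*pvCharInt c3 + pvCharInt c4
            + 3*pvCharInt c5 + pvCharInt c6 + 3*pvCharInt c7 + pvCharInt c8 + 3*pvCharInt c9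
            + pvCharInt c10 + 3*pvCharInt c11 + pvCharInt c12) 10 = 0
      then "Valid" else "Invalid" := by
  have hlen : PySem.Str.len num = 13 := by simp [PySem.Str.len_eq, hl]
  rw [validateISBN_alt]
  simp only [hl, hlen, PySem.List.enumerate_cons, PySem.List.enumerate_nil]
  norm_num [PySem.List.enumerate_cons, PySem.List.enumerate_nil]
  ring_nf

lemma A_len13 (num : String) (c0 c1 c2 c3 c4 c5 c6 c7 c8 c9 c10 c11 c12 : Char)
    (hl : num.toList = [c0,c1,c2,c3,c4,c5,c6,c7,c8,c9,c10,c11,c12]) :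
    validateISBN num =
      if PySem.Int.mod
          (pvCharInt c0 + 3*pvCharInt c1 + pvCharInt c2 + 3*pvCharInt c3 + pvCharInt c4
            + 3*pvCharInt c5 + pvCharInt c6 + 3*pvCharInt c7 + pvCharInt c8 + 3*pvCharInt c9
            + pvCharInt c10 + 3*pvCharInt c11 + pvCharInt c12) 10 == 0
      then "Valid" else "Invalid" := by
  have hlen : PySem.Str.len num = 13 := by simp [PySem.Str.len_eq, hl]
  rw [validateISBN]
  rw [if_neg (by rw [hlen]; norm_num), if_pos hlen,
    valid13_eval num c0 c1 c2 c3 c4 c5 c6 c7 c8 c9 c10 c11 c12 hl]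

lemma list_len10 {α : Type} (l : List α) (h : l.length = 10) :
    ∃ a0 a1 a2 a3 a4 a5 a6 a7 a8 a9, l = [a0,a1,a2,a3,a4,a5,a6,a7,a8,a9] := by
  rcases l with _|⟨a0,_|⟨a1,_|⟨a2,_|⟨a3,_|⟨a4,_|⟨a5,_|⟨a6,_|⟨a7,_|⟨a8,_|⟨a9,rest⟩⟩⟩⟩⟩⟩⟩⟩⟩⟩ <;>
    simp_all

lemma list_len13 {α : Type} (l : List α) (h : l.length = 13) :
    ∃ c0 c1 c2 c3 c4 c5 c6 c7 c8 c9 c10 c11 c12,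
      l = [c0,c1,c2,c3,c4,c5,c6,c7,c8,c9,c10,c11,c12] := by
  rcases l with _|⟨c0,_|⟨c1,_|⟨c2,_|⟨c3,_|⟨c4,_|⟨c5,_|⟨c6,_|⟨c7,_|⟨c8,_|⟨c9,_|⟨c10,_|⟨c11,_|⟨c12,rest⟩⟩⟩⟩⟩⟩⟩⟩⟩⟩⟩⟩⟩ <;>
    simp_all

def pvVal (c : Char) : Int := (c.toNat : Int) - 48

lemma pvVal_eq (c : Char) (h : pvDigit c = true) : pvVal c = pvCharInt c := by
  simp [pvDigit, List.contains_eq_mem] at h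
  rcases h with rfl|rfl|rfl|rfl|rfl|rfl|rfl|rfl|rfl|rfl <;> decide

lemma pvS12l_eval (a0 a1 a2 a3 a4 a5 a6 a7 a8 a9 : Char)
    (h0 : pvDigit a0 = true) (h1 : pvDigit a1 = true) (h2 : pvDigit a2 = true)
    (h3 : pvDigit a3 = true) (h4 : pvDigit a4 = true) (h5 : pvDigit a5 = true)
    (h6 : pvDigit a6 = true) (h7 : pvDigit a7 = true) (h8 : pvDigit a8 = true) :
    38 + pvW [a0,a1,a2,a3,a4,a5,a6,a7,a8,a9] [3,1,3,1,3,1,3,1,3] = pvS a0 a1 a2 a3 a4 a5 a6 a7 a8 := by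
  have e0 := pvVal_eq a0 h0; have e1 := pvVal_eq a1 h1; have e2 := pvVal_eq a2 h2
  have e3 := pvVal_eq a3 h3; have e4 := pvVal_eq a4 h4; have e5 := pvVal_eq a5 h5
  have e6 := pvVal_eq a6 h6; have e7 := pvVal_eq a7 h7; have e8 := pvVal_eq a8 h8
  simp only [pvVal] at e0 e1 e2 e3 e4 e5 e6 e7 e8
  simp only [pvW, List.zip, List.zipWith, List.foldr, pvS]
  omega

lemma pvSum10_eval (a0 a1 a2 a3 a4 a5 a6 a7 a8 a9 : Char)
    (h0 : pvDigit a0 = true) (h1 : pvDigit a1 = true) (h2 : pvDigit a2 = true)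
    (h3 : pvDigit a3 = true) (h4 : pvDigit a4 = true) (h5 : pvDigit a5 = true)
    (h6 : pvDigit a6 = true) (h7 : pvDigit a7 = true) (h8 : pvDigit a8 = true)
    (h9 : pvDigit a9 = true) :
    pvW [a0,a1,a2,a3,a4,a5,a6,a7,a8,a9] [10,9,8,7,6,5,4,3,2,1] =
      10*pvCharInt a0 + 9*pvCharInt a1 + 8*pvCharInt a2 + 7*pvCharInt a3 + 6*pvCharInt a4
        + 5*pvCharInt a5 + 4*pvCharInt a6 + 3*pvCharInt a7 + 2*pvCharInt a8 + pvCharInt a9 := by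
  have e0 := pvVal_eq a0 h0; have e1 := pvVal_eq a1 h1; have e2 := pvVal_eq a2 h2
  have e3 := pvVal_eq a3 h3; have e4 := pvVal_eq a4 h4; have e5 := pvVal_eq a5 h5
  have e6 := pvVal_eq a6 h6; have e7 := pvVal_eq a7 h7; have e8 := pvVal_eq a8 h8
  have e9 := pvVal_eq a9 h9
  simp only [pvVal] at e0 e1 e2 e3 e4 e5 e6 e7 e8 e9
  simp only [pvW, List.zip, List.zipWith, List.foldr]
  omega

lemma pvMod11_emod (a : Int) : PySem.Int.mod a 11 = a % 11 :=
  PySem.Int.mod_eq_emod_of_pos (by norm_num)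

lemma main_unchanged (num : String) (hpre : Pre_validateISBN num)
    (hnD : ¬ D_validateISBN num) : validateISBN num = validateISBN_alt num := by
  by_cases h10 : num.toList.length = 10
  · obtain ⟨a0,a1,a2,a3,a4,a5,a6,a7,a8,a9,hl⟩ := list_len10 num.toList h10
    obtain ⟨hall, hlast⟩ := hpre.1 h10
    rw [hl] at hall hlast
    simp only [List.take_succ_cons, List.take_zero, List.all_cons, List.all_nil,
      Bool.and_eq_true, and_true] at hall
    obtain ⟨h0,h1,h2,h3,h4,h5,h6,h7,h8⟩ := hall
    simp only [List.getD] at hlast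
    by_cases hX : a9 = 'X'
    · subst hX
      rw [A_len10X num a0 a1 a2 a3 a4 a5 a6 a7 a8 hl,
        B_len10X num a0 a1 a2 a3 a4 a5 a6 a7 a8 hl]
      by_cases hc : PySem.Int.mod (10 + 10*pvCharInt a0 + 9*pvCharInt a1 + 8*pvCharInt a2
          + 7*pvCharInt a3 + 6*pvCharInt a4 + 5*pvCharInt a5 + 4*pvCharInt a6 + 3*pvCharInt a7
          + 2*pvCharInt a8) 11 = 0
      · rw [if_pos (by simp only [beq_iff_eq]; exact hc), if_pos hc]
        have hd0 : 0 ≤ PySem.Int.mod (10 - PySem.Int.mod (pvS a0 a1 a2 a3 a4 a5 a6 a7 a8) 10) 10 := by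
          rw [pvMod_emod, pvMod_emod]; omega
        have hd9 : PySem.Int.mod (10 - PySem.Int.mod (pvS a0 a1 a2 a3 a4 a5 a6 a7 a8) 10) 10 ≤ 9 := by
          rw [pvMod_emod, pvMod_emod]; omega
        have hdm : (pvS a0 a1 a2 a3 a4 a5 a6 a7 a8
            + PySem.Int.mod (10 - PySem.Int.mod (pvS a0 a1 a2 a3 a4 a5 a6 a7 a8) 10) 10) % 10 = 0 := by
          rw [pvMod_emod, pvMod_emod]; omega
        rw [searchLoop_main a0 a1 a2 a3 a4 a5 a6 a7 a8 '0' (by decide) _ hd0 hd9 hdm,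
          if_neg (by rintro ⟨hbad, -⟩; exact absurd hbad (by decide))]
      · rw [if_neg (by simp only [beq_iff_eq]; exact hc), if_neg hc]
    · have h9d : pvDigit a9 = true := by
        rcases hlast with h | h
        · exact h
        · exact absurd h hX
      rw [A_len10 num a0 a1 a2 a3 a4 a5 a6 a7 a8 a9 hl hX,
        B_len10 num a0 a1 a2 a3 a4 a5 a6 a7 a8 a9 hl hX]
      by_cases hc : PySem.Int.mod (10*pvCharInt a0 + 9*pvCharInt a1 + 8*pvCharInt a2
          + 7*pvCharInt a3 + 6*pvCharInt a4 + 5*pvCharInt a5 + 4*pvCharInt a6 + 3*pvCharInt a7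
          + 2*pvCharInt a8 + pvCharInt a9) 11 = 0
      · rw [if_pos (by simp only [beq_iff_eq]; exact hc), if_pos hc]
        have hd0 : 0 ≤ PySem.Int.mod (10 - PySem.Int.mod (pvS a0 a1 a2 a3 a4 a5 a6 a7 a8) 10) 10 := by
          rw [pvMod_emod, pvMod_emod]; omega
        have hd9 : PySem.Int.mod (10 - PySem.Int.mod (pvS a0 a1 a2 a3 a4 a5 a6 a7 a8) 10) 10 ≤ 9 := by
          rw [pvMod_emod, pvMod_emod]; omega
        have hdm : (pvS a0 a1 a2 a3 a4 a5 a6 a7 a8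
            + PySem.Int.mod (10 - PySem.Int.mod (pvS a0 a1 a2 a3 a4 a5 a6 a7 a8) 10) 10) % 10 = 0 := by
          rw [pvMod_emod, pvMod_emod]; omega
        rw [searchLoop_main a0 a1 a2 a3 a4 a5 a6 a7 a8 a9 h9d _ hd0 hd9 hdm, if_neg ?nine]
        case nine =>
          rintro ⟨h9eq, hd1⟩
          apply hnD
          have ha9 : a9 = '9' := by
            rw [(digit_char a9 h9d).2.2, h9eq]; rfl
          refine ⟨h10, ?_, ?_, ?_⟩
          · rw [hl]; simp [List.getD, ha9]
          · rw [hl, pvSum10_eval a0 a1 a2 a3 a4 a5 a6 a7 a8 a9 h0 h1 h2 h3 h4 h5 h6 h7 h8 h9d]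
            rw [pvMod11_emod] at hc
            exact hc
          · rw [hl, pvS12l_eval a0 a1 a2 a3 a4 a5 a6 a7 a8 a9 h0 h1 h2 h3 h4 h5 h6 h7 h8]
            rw [pvMod_emod, pvMod_emod] at hd1
            omega
      · rw [if_neg (by simp only [beq_iff_eq]; exact hc), if_neg hc]
  · by_cases h13 : num.toList.length = 13
    · obtain ⟨c0,c1,c2,c3,c4,c5,c6,c7,c8,c9,c10,c11,c12,hl⟩ := list_len13 num.toList h13
      rw [A_len13 num c0 c1 c2 c3 c4 c5 c6 c7 c8 c9 c10 c11 c12 hl,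
        B_len13 num c0 c1 c2 c3 c4 c5 c6 c7 c8 c9 c10 c11 c12 hl]
      simp only [beq_iff_eq]
    · rw [validateISBN, validateISBN_alt]
      rw [if_neg (by simp [PySem.Str.len_eq, -String.length_toList]; omega),
        if_neg (by simp [PySem.Str.len_eq, -String.length_toList]; omega),
        if_neg (by simp [PySem.Str.len_eq, -String.length_toList]; omega),
        if_neg (by simp [PySem.Str.len_eq, -String.length_toList]; omega)]

lemma main_tight (num : String) (hpre : Pre_validateISBN num)
    (hD : D_validateISBN num) : validateISBN num ≠ validateISBN_alt num := by
  obtain ⟨h10, h9eq, hsum, hs12⟩ := hD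
  obtain ⟨a0,a1,a2,a3,a4,a5,a6,a7,a8,a9,hl⟩ := list_len10 num.toList h10
  have hall9 := (hpre.1 h10).1
  rw [hl] at hall9 h9eq hsum hs12
  simp only [List.take_succ_cons, List.take_zero, List.all_cons, List.all_nil,
    Bool.and_eq_true, and_true] at hall9
  obtain ⟨h0,h1,h2,h3,h4,h5,h6,h7,h8⟩ := hall9
  simp only [List.getD] at h9eq
  norm_num at h9eq
  subst h9eq
  rw [pvSum10_eval a0 a1 a2 a3 a4 a5 a6 a7 a8 '9' h0 h1 h2 h3 h4 h5 h6 h7 h8 (by decide)] at hsum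
  rw [pvS12l_eval a0 a1 a2 a3 a4 a5 a6 a7 a8 '9' h0 h1 h2 h3 h4 h5 h6 h7 h8] at hs12
  rw [A_len10 num a0 a1 a2 a3 a4 a5 a6 a7 a8 '9' hl (by decide),
    B_len10 num a0 a1 a2 a3 a4 a5 a6 a7 a8 '9' hl (by decide)]
  rw [if_pos (by simp only [beq_iff_eq]; rw [pvMod11_emod]; exact hsum),
    if_pos (by rw [pvMod11_emod]; exact hsum)]
  have hd1 : PySem.Int.mod (10 - PySem.Int.mod (pvS a0 a1 a2 a3 a4 a5 a6 a7 a8) 10) 10 = 1 := by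
    rw [pvMod_emod, pvMod_emod]; omega
  have hdm : (pvS a0 a1 a2 a3 a4 a5 a6 a7 a8
      + PySem.Int.mod (10 - PySem.Int.mod (pvS a0 a1 a2 a3 a4 a5 a6 a7 a8) 10) 10) % 10 = 0 := by
    rw [pvMod_emod, pvMod_emod]; omega
  rw [searchLoop_main a0 a1 a2 a3 a4 a5 a6 a7 a8 '9' (by decide) _ (by rw [hd1]; norm_num)
      (by rw [hd1]; norm_num) hdm,
    if_pos (by exact ⟨by decide, hd1⟩), hd1]
  intro hbad
  rw [show PySem.Int.toChars 1 = ['1'] from by decide] at hbad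
  have := congrArg String.toList hbad
  simp [pvPref] at this

-- ===== VERDICT (by name: the statement is the Claim_ definition above) =====
theorem validateISBN_spec : Claim_unchanged_validateISBN := by
  intro num _hdom hpre hnD
  exact main_unchanged num hpre hnD

theorem validateISBN_changed : Claim_changed_validateISBN := by
  unfold Claim_changed_validateISBN; decide

theorem validateISBN_tight : Claim_exact_validateISBN := by
  intro num _hdom hpre hD
  exact main_tight num hpre hD
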